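-- pv_equiv track=rewrite | github.com/comarelli/-challenge-python-hotel-reservation-test | src/my_module.py | get_cheapest_hotel
-- ===== SOURCE A (Python) =====
-- def get_cheapest_hotel(number):   #DO NOT change the function's name
--
--     Av_lakewood = 3                                              #Define avaliação do hotel
--     Av_bridgewood = 4
--     Av_ridgewood = 5
--     dias_fds = number.count('sat') + number.count('sun')           #contabiliza número de dias no fim de semana
--     dias_sem = sum(number.count(j) for j in ['mon','tues','wed','thur','fri'])   #contabiliza número de dias de semana
--
--     if 'Rewards' in number:                                   #Preço em cada hotel para fidelidade
--         Pr_Lakewood = 80*dias_sem + 80*dias_fds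
--         Pr_Bridgewood = 110*dias_sem + 50*dias_fds
--         Pr_Ridgewood = 100*dias_sem + 40*dias_fds
--
--     if 'Regular' in number:                                   #Preço em cada hotel para comum
--         Pr_Lakewood = 110*dias_sem + 90*dias_fds
--         Pr_Bridgewood = 160*dias_sem + 60*dias_fds
--         Pr_Ridgewood = 220*dias_sem + 150*dias_fds
--     Pr_list = [Pr_Lakewood, Pr_Bridgewood, Pr_Ridgewood]      #Lista com o preço encontrado
--     Pr_list.sort(reverse=False)                               #Ordena de forma crescente a lista
--     for i in [Pr_Lakewood, Pr_Bridgewood, Pr_Ridgewood]:      #Encontra qual hotel está na posição 0 da lista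
--         if Pr_list.index(i) == 0:
--             aux = i
--
--     if (Pr_Ridgewood == Pr_Bridgewood and (Pr_Ridgewood == aux or Pr_Bridgewood == aux)) or (Pr_Ridgewood == Pr_Lakewood and (Pr_Ridgewood == aux or Pr_Lakewood == aux)) or (Pr_Bridgewood == Pr_Lakewood and (Pr_Bridgewood == aux or Pr_Lakewood == aux)):     #Confere se dois ou mais hoteis possuem o preço mais barato
--         if Pr_Ridgewood == Pr_Lakewood and Pr_Ridgewood == Pr_Bridgewood:
--             if Av_ridgewood > Av_lakewood:                    #Condicionais que decidem qual hotel tem a melhor avaliação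
--                 cheapest_hotel = 'Ridgewood'
--             elif Av_lakewood >Av_bridgewood:
--                 cheapest_hotel = 'Lakewood'
--             else:
--                 cheapest_hotel = 'Bridgewood'
--
--         elif Pr_Ridgewood == Pr_Bridgewood:
--             if Av_ridgewood > Av_bridgewood:
--                 cheapest_hotel = 'Ridgewood'
--             else:
--                 cheapest_hotel = 'Bridgewood'
--
--         elif Pr_Bridgewood == Pr_Lakewood:
--             if Av_bridgewood > Av_lakewood:
--                 cheapest_hotel = 'Bridgewood'
--             else:
--                 cheapest_hotel = 'Lakewood'
--
--         elif Pr_Ridgewood == Pr_Lakewood: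
--             if Av_ridgewood > Av_lakewood:
--                 cheapest_hotel = 'Ridgewood'
--             else:
--                 cheapest_hotel = 'Lakewood'
--
--     else:                                   #caso não tenha hoteis empatados com o menor preço
--         if   Pr_Bridgewood == aux:          #condicionais que encontram o hotel com menor preço
--                 cheapest_hotel = 'Bridgewood'
--
--         elif Pr_Lakewood == aux:
--             cheapest_hotel = 'Lakewood'
--
--         else:
--             cheapest_hotel = 'Ridgewood'
--
--     return cheapest_hotel
-- ===== SOURCE B (Python) =====
-- def get_cheapest_hotel(number):
--     dias_fds = number.count('sat') + number.count('sun')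
--     dias_sem = sum(number.count(j) for j in ['mon','tues','wed','thur','fri'])
--
--     if 'Rewards' in number:
--         Pr_Lakewood = 80*dias_sem + 80*dias_fds
--         Pr_Bridgewood = 110*dias_sem + 50*dias_fds
--         Pr_Ridgewood = 100*dias_sem + 40*dias_fds
--
--     if 'Regular' in number:
--         Pr_Lakewood = 110*dias_sem + 90*dias_fds
--         Pr_Bridgewood = 160*dias_sem + 60*dias_fds
--         Pr_Ridgewood = 220*dias_sem + 150*dias_fds
--
--     # cheapest price, highest rating on ties (ratings: Lakewood 3, Bridgewood 4, Ridgewood 5)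
--     return min((Pr_Lakewood, -3, 'Lakewood'),
--                (Pr_Bridgewood, -4, 'Bridgewood'),
--                (Pr_Ridgewood, -5, 'Ridgewood'))[2]
-- ===== Notes on version B (the rewrite author's own statement) =====
-- stated objective: simpler
-- what changed: The pricing if-blocks are kept, but A's sort + index loop + nested tie-break conditional is replaced by a single min over (price, -rating, name) tuples, whose -rating key reproduces A's higher-rating-wins tie-break.
import Mathlib
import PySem

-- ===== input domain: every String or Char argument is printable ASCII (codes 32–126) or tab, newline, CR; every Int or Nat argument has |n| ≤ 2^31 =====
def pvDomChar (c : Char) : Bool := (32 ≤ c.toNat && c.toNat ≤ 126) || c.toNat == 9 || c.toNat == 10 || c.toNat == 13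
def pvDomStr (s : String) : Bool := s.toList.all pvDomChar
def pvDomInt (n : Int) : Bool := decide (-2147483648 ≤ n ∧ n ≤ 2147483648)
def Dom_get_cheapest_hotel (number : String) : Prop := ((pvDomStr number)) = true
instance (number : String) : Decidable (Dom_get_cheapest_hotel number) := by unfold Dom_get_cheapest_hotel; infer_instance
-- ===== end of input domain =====

-- B replaces A's sort + index loop + nested tie-break conditional by a single min over
-- (price, -rating, name) tuples; the pricing `if` blocks are kept verbatim (objective: simpler).

-- ===== PORT A =====

-- prices of the three hotels; `none` models the UnboundLocalError when neither
-- 'Rewards' nor 'Regular' occurs (excluded by Pre_)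
def pvPrices (number : String) : Option (Int × Int × Int) :=
  let dias_fds : Int := (PySem.Str.count number "sat" : Int) + (PySem.Str.count number "sun" : Int)
  let dias_sem : Int := (([ "mon", "tues", "wed", "thur", "fri" ].map
      (fun j => (PySem.Str.count number j : Int))).sum)
  let o : Option (Int × Int × Int) := none
  let o := if PySem.Str.isIn "Rewards" number then
      some (80*dias_sem + 80*dias_fds, 110*dias_sem + 50*dias_fds, 100*dias_sem + 40*dias_fds)
    else o
  let o := if PySem.Str.isIn "Regular" number then
      some (110*dias_sem + 90*dias_fds, 160*dias_sem + 60*dias_fds, 220*dias_sem + 150*dias_fds)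
    else o
  o

-- the sort + index loop + tie-break tail of A, transliterated
def pvPickA (prL prB prR : Int) : String :=
  let prList := PySem.List.sorted [prL, prB, prR] (fun x => x) false
  -- the loop always assigns aux (the minimum is in the list); 0 is an inert initial value
  let aux := [prL, prB, prR].foldl
      (fun aux i => if PySem.List.index? prList i = some 0 then i else aux) 0
  if (prR = prB ∧ (prR = aux ∨ prB = aux)) ∨ (prR = prL ∧ (prR = aux ∨ prL = aux)) ∨
     (prB = prL ∧ (prB = aux ∨ prL = aux)) then
    if prR = prL ∧ prR = prB then
      if (5:Int) > 3 then "Ridgewood"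
      else if (3:Int) > 4 then "Lakewood"
      else "Bridgewood"
    else if prR = prB then
      if (5:Int) > 4 then "Ridgewood" else "Bridgewood"
    else if prB = prL then
      if (4:Int) > 3 then "Bridgewood" else "Lakewood"
    else if prR = prL then
      if (5:Int) > 3 then "Ridgewood" else "Lakewood"
    else "Ridgewood"  -- unreachable fall-through of Python's elif chain (cheapest_hotel stays unbound only if no branch fires; cannot happen)
  else
    if prB = aux then "Bridgewood"
    else if prL = aux then "Lakewood"
    else "Ridgewood"

def get_cheapest_hotel (number : String) : String :=
  match pvPrices number with
  | none => ""   -- Python raises UnboundLocalError here; outside Pre_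
  | some (prL, prB, prR) => pvPickA prL prB prR

-- ===== PORT B =====

-- Python tuple '<' on (Int, Int, String): lexicographic
def pvTupLt (x y : Int × Int × String) : Bool :=
  x.1 < y.1 || (x.1 == y.1 && (x.2.1 < y.2.1 || (x.2.1 == y.2.1 && decide (x.2.2 < y.2.2))))

-- Python's min over the three candidate tuples (first extremal kept)
def pvPickB (prL prB prR : Int) : String :=
  ([(prB, (-4 : Int), "Bridgewood"), (prR, (-5 : Int), "Ridgewood")].foldl
      (fun m c => if pvTupLt c m then c else m) (prL, (-3 : Int), "Lakewood")).2.2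

def get_cheapest_hotel_alt (number : String) : String :=
  match pvPrices number with
  | none => ""   -- same missing-keyword case, outside Pre_
  | some (prL, prB, prR) => pvPickB prL prB prR

-- ===== PRECONDITION & SPEC =====
-- Pre_ excludes inputs that contain neither customer-type keyword, on which both Pythons raise UnboundLocalError.
def Pre_get_cheapest_hotel (number : String) : Prop :=
  PySem.Str.isIn "Rewards" number = true ∨ PySem.Str.isIn "Regular" number = true
instance (number : String) : Decidable (Pre_get_cheapest_hotel number) := by
  unfold Pre_get_cheapest_hotel; infer_instance

def pvWitness_get_cheapest_hotel : String := "Regular: mon, tues, sat"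

def Spec_get_cheapest_hotel (number : String) (out : String) : Prop := out = get_cheapest_hotel_alt number
instance (number : String) (out : String) : Decidable (Spec_get_cheapest_hotel number out) := by unfold Spec_get_cheapest_hotel; infer_instance

-- ===== CLAIM (what is proved, stated in full; the proofs are below) =====
def Claim_equal_get_cheapest_hotel : Prop := ∀ (number : String), Dom_get_cheapest_hotel number → Pre_get_cheapest_hotel number → Spec_get_cheapest_hotel number (get_cheapest_hotel number)

-- ===== LEMMAS AND PROOFS =====

set_option maxHeartbeats 2000000 in
set_option maxRecDepth 8192 in
lemma pvAux_eq (a b c : Int) :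
    ([a, b, c].foldl
      (fun aux i => if PySem.List.index? (PySem.List.sorted [a, b, c] (fun x => x) false) i = some 0 then i else aux) 0)
      = min a (min b c) := by
  simp only [PySem.List.sorted, PySem.List.insertBy, PySem.List.index?_eq_idxOf?,
    List.idxOf?, List.findIdx?, List.foldl]
  split_ifs at * <;>
    simp_all [PySem.List.insertBy, List.findIdx?.go, Bool.cond_eq_ite, beq_iff_eq] <;>
    first
      | omega
      | (split_ifs at * <;>
          simp_all [List.findIdx?.go, Bool.cond_eq_ite, beq_iff_eq] <;>
          first
            | omega
            | (split_ifs at * <;> simp_all <;> omega))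

set_option maxHeartbeats 2000000 in
set_option maxRecDepth 8192 in
lemma pvPick_eq (a b c : Int) : pvPickA a b c = pvPickB a b c := by
  simp only [pvPickA, pvAux_eq]
  simp only [pvPickB, pvTupLt, List.foldl]
  norm_num
  try simp only [decide_eq_true_eq, beq_iff_eq, Bool.or_eq_true, Bool.and_eq_true]
  split_ifs <;> (try dsimp only at *) <;> first | rfl | omega

-- ===== VERDICT (by name: the statement is the Claim_ definition above) =====
theorem get_cheapest_hotel_spec : Claim_equal_get_cheapest_hotel := by
  intro number _ hpre
  unfold Spec_get_cheapest_hotel get_cheapest_hotel get_cheapest_hotel_alt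
  cases h : pvPrices number with
  | none =>
      exfalso
      rcases hpre with hp | hp <;>
        simp [pvPrices] at h <;> split at h <;> simp_all
  | some t => exact pvPick_eq t.1 t.2.1 t.2.2
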